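-- pv_equiv track=rewrite | github.com/softkleenex/arc-prize-2025-gold | submission_kernel.py | learn_color_map
-- ===== SOURCE A (Python) =====
-- def learn_color_map(train_examples):
--     """Learn consistent color mapping"""
--     all_maps = []
--
--     for ex in train_examples:
--         in_grid = ex['input']
--         out_grid = ex['output']
--
--         if len(in_grid) != len(out_grid) or len(in_grid[0]) != len(out_grid[0]):
--             continue
--
--         color_map = {}
--         for i in range(len(in_grid)):
--             for j in range(len(in_grid[0])):
--                 if in_grid[i][j] != 0:
--                     color_map[in_grid[i][j]] = out_grid[i][j]
--
--         all_maps.append(color_map)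
--
--     # Find consensus
--     if not all_maps:
--         return {}
--
--     final_map = {}
--     all_keys = set()
--     for m in all_maps:
--         all_keys.update(m.keys())
--
--     for key in all_keys:
--         values = [m.get(key) for m in all_maps if key in m]
--         if values and all(v == values[0] for v in values):
--             final_map[key] = values[0]
--
--     return final_map
-- ===== SOURCE B (Python) =====
-- def learn_color_map(train_examples):
--     """Learn consistent color mapping (single-pass consensus with a latch flag)"""
--     consensus = {}  # color -> [mapped value, still consistent]
--
--     for ex in train_examples:
--         in_grid = ex['input']
--         out_grid = ex['output']
--
--         if len(in_grid) != len(out_grid) or len(in_grid[0]) != len(out_grid[0]):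
--             continue
--
--         color_map = {}
--         for i in range(len(in_grid)):
--             for j in range(len(in_grid[0])):
--                 if in_grid[i][j] != 0:
--                     color_map[in_grid[i][j]] = out_grid[i][j]
--
--         for k, v in color_map.items():
--             if k in consensus:
--                 if consensus[k][0] != v:
--                     consensus[k][1] = False
--             else:
--                 consensus[k] = [v, True]
--
--     return {k: v for k, (v, ok) in consensus.items() if ok}
-- ===== Notes on version B (the rewrite author's own statement) =====
-- stated objective: simpler
-- what changed: A collects every per-example color_map into all_maps, unions all keys into a set, and then re-scans every stored map for every key to test all-equal; B drops the all_maps list and key set entirely and folds each example's color_map into one running consensus dict of (value, still-consistent) pairs with a permanent conflict latch, returning the consistent entries at the end.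
-- outside the precondition, e.g. on learn_color_map([{'input': [], 'output': []}]): A raises IndexError, B raises IndexError; on learn_color_map([{'input': [[1]]}]): A raises KeyError, B raises KeyError
import Mathlib
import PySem

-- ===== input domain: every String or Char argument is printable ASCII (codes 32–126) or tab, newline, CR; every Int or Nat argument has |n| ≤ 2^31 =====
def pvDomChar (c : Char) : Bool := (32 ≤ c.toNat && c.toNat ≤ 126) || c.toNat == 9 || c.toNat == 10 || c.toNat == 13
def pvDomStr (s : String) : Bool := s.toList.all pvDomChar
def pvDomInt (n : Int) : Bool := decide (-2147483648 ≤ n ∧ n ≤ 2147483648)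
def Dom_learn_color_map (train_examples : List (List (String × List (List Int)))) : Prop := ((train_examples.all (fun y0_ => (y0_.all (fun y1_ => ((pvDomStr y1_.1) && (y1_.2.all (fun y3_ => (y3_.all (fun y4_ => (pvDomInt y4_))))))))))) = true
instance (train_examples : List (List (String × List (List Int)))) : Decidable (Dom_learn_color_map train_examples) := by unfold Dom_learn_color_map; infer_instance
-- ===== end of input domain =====

-- B replaces A's two-phase consensus (collect every per-example color_map, then re-scan all of
-- them for every key) by one running dict of (value, still-consistent) pairs merged example by
-- example; objective: simpler (same per-example guards and color_map loop).

-- ===== PORT A =====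
-- the per-example color_map scan, textually identical in both Pythons (last occurrence wins)
def pvColorMap (in_grid out_grid : List (List Int)) : PySem.Dict Int Int :=
  (List.range in_grid.length).foldl (fun color_map i =>
    (List.range (in_grid.headD []).length).foldl (fun color_map j =>
      if (in_grid.getD i []).getD j 0 != 0 then
        color_map.insert ((in_grid.getD i []).getD j 0) ((out_grid.getD i []).getD j 0)
      else color_map) color_map) PySem.Dict.empty

def learn_color_map (train_examples : List (List (String × List (List Int)))) : List (Int × Int) :=
  let all_maps : List (PySem.Dict Int Int) :=
    train_examples.foldl (fun all_maps ex =>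
      let in_grid := (PySem.Dict.mk ex).getD "input" []
      let out_grid := (PySem.Dict.mk ex).getD "output" []
      if in_grid.length != out_grid.length || (in_grid.headD []).length != (out_grid.headD []).length then
        all_maps
      else
        all_maps ++ [pvColorMap in_grid out_grid]) []
  if all_maps.isEmpty then []
  else
    let all_keys : PySem.Set Int :=
      all_maps.foldl (fun all_keys m => PySem.Set.update all_keys m.keys) PySem.Set.empty
    let final_map : PySem.Dict Int Int :=
      all_keys.foldl (fun final_map key =>
        let values := (all_maps.filter (fun m => m.contains key)).map (fun m => m.getD key 0)
        if !values.isEmpty && values.all (fun v => v == values.headD 0) then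
          final_map.insert key (values.headD 0)
        else final_map) PySem.Dict.empty
    final_map.items

-- ===== PORT B =====
def learn_color_map_alt (train_examples : List (List (String × List (List Int)))) : List (Int × Int) :=
  let consensus : PySem.Dict Int (Int × Bool) :=
    train_examples.foldl (fun consensus ex =>
      let in_grid := (PySem.Dict.mk ex).getD "input" []
      let out_grid := (PySem.Dict.mk ex).getD "output" []
      if in_grid.length != out_grid.length || (in_grid.headD []).length != (out_grid.headD []).length then
        consensus
      else
        (pvColorMap in_grid out_grid).items.foldl (fun consensus kv =>
          match consensus.get? kv.1 with
          | some p => if p.1 != kv.2 then consensus.insert kv.1 (p.1, false) else consensus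
          | none => consensus.insert kv.1 (kv.2, true)) consensus) PySem.Dict.empty
  consensus.items.filterMap (fun kv => if kv.2.2 then some (kv.1, kv.2.1) else none)

-- ===== PRECONDITION & SPEC =====
-- Pre_ excludes the inputs on which the Python A raises: an example missing the
-- 'input'/'output' key (KeyError), an empty grid reached by in_grid[0] when the two grid
-- heights are equal (IndexError), and ragged grids whose rows are shorter than the first row
-- (IndexError when the i/j scan indexes past such a row; on the few ragged grids where zeros
-- in in_grid shield the short out_grid row, A returns normally and both programs agree).
def pvOkEx (ex : List (String × List (List Int))) : Bool :=
  (PySem.Dict.mk ex).contains "input" && (PySem.Dict.mk ex).contains "output" &&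
    (let ig := (PySem.Dict.mk ex).getD "input" []
     let og := (PySem.Dict.mk ex).getD "output" []
     if ig.length != og.length then true
     else
       !ig.isEmpty &&
         ((ig.headD []).length != (og.headD []).length ||
           (ig.all (fun r => decide ((ig.headD []).length ≤ r.length)) &&
            og.all (fun r => decide ((ig.headD []).length ≤ r.length)))))

def Pre_learn_color_map (train_examples : List (List (String × List (List Int)))) : Prop :=
  ∀ ex ∈ train_examples, pvOkEx ex = true
instance (train_examples : List (List (String × List (List Int)))) : Decidable (Pre_learn_color_map train_examples) := by unfold Pre_learn_color_map; infer_instance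

def pvWitness_learn_color_map : (List (List (String × List (List Int)))) :=
  [[("input", [[1, 0], [2, 1]]), ("output", [[3, 0], [4, 3]])]]

def Spec_learn_color_map (train_examples : List (List (String × List (List Int)))) (out : List (Int × Int)) : Prop := out = learn_color_map_alt train_examples
instance (train_examples : List (List (String × List (List Int)))) (out : List (Int × Int)) : Decidable (Spec_learn_color_map train_examples out) := by unfold Spec_learn_color_map; infer_instance

-- ===== CLAIM (what is proved, stated in full; the proofs are below) =====
def Claim_equal_learn_color_map : Prop := ∀ (train_examples : List (List (String × List (List Int)))), Dom_learn_color_map train_examples → Pre_learn_color_map train_examples → Spec_learn_color_map train_examples (learn_color_map train_examples)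

-- ===== LEMMAS AND PROOFS =====
def pvBad (ex : List (String × List (List Int))) : Bool :=
  let in_grid := (PySem.Dict.mk ex).getD "input" []
  let out_grid := (PySem.Dict.mk ex).getD "output" []
  in_grid.length != out_grid.length || (in_grid.headD []).length != (out_grid.headD []).length
def pvCM (ex : List (String × List (List Int))) : PySem.Dict Int Int :=
  pvColorMap ((PySem.Dict.mk ex).getD "input" []) ((PySem.Dict.mk ex).getD "output" [])
def pvMaps (te : List (List (String × List (List Int)))) : List (PySem.Dict Int Int) :=
  (te.filter (fun ex => !pvBad ex)).map pvCM

theorem pv_portA_maps (te : List (List (String × List (List Int)))) (acc : List (PySem.Dict Int Int)) :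
    te.foldl (fun all_maps ex =>
      let in_grid := (PySem.Dict.mk ex).getD "input" []
      let out_grid := (PySem.Dict.mk ex).getD "output" []
      if in_grid.length != out_grid.length || (in_grid.headD []).length != (out_grid.headD []).length then
        all_maps
      else
        all_maps ++ [pvColorMap in_grid out_grid]) acc = acc ++ pvMaps te := by
  induction te generalizing acc with
  | nil => simp [pvMaps]
  | cons ex te ih =>
    simp only [List.foldl_cons]
    by_cases hb : pvBad ex
    · rw [show (if ((PySem.Dict.mk ex).getD "input" []).length != ((PySem.Dict.mk ex).getD "output" []).length || (((PySem.Dict.mk ex).getD "input" []).headD []).length != (((PySem.Dict.mk ex).getD "output" []).headD []).length then acc else acc ++ [pvColorMap ((PySem.Dict.mk ex).getD "input" []) ((PySem.Dict.mk ex).getD "output" [])]) = acc from by simp_all [pvBad]]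
      rw [ih]
      simp [pvMaps, hb]
    · rw [show (if ((PySem.Dict.mk ex).getD "input" []).length != ((PySem.Dict.mk ex).getD "output" []).length || (((PySem.Dict.mk ex).getD "input" []).headD []).length != (((PySem.Dict.mk ex).getD "output" []).headD []).length then acc else acc ++ [pvColorMap ((PySem.Dict.mk ex).getD "input" []) ((PySem.Dict.mk ex).getD "output" [])]) = acc ++ [pvCM ex] from by simp_all [pvBad, pvCM]]
      rw [ih]
      simp [pvMaps, hb, pvCM]

def pvMergeStep (c : PySem.Dict Int (Int × Bool)) (kv : Int × Int) : PySem.Dict Int (Int × Bool) :=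
  match c.get? kv.1 with
  | some p => if p.1 != kv.2 then c.insert kv.1 (p.1, false) else c
  | none => c.insert kv.1 (kv.2, true)

def pvMerge (c : PySem.Dict Int (Int × Bool)) (m : PySem.Dict Int Int) : PySem.Dict Int (Int × Bool) :=
  m.items.foldl pvMergeStep c

theorem pv_portB_maps (te : List (List (String × List (List Int)))) (c : PySem.Dict Int (Int × Bool)) :
    te.foldl (fun consensus ex =>
      let in_grid := (PySem.Dict.mk ex).getD "input" []
      let out_grid := (PySem.Dict.mk ex).getD "output" []
      if in_grid.length != out_grid.length || (in_grid.headD []).length != (out_grid.headD []).length then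
        consensus
      else
        (pvColorMap in_grid out_grid).items.foldl (fun consensus kv =>
          match consensus.get? kv.1 with
          | some p => if p.1 != kv.2 then consensus.insert kv.1 (p.1, false) else consensus
          | none => consensus.insert kv.1 (kv.2, true)) consensus) c = (pvMaps te).foldl pvMerge c := by
  simp only [show (fun (consensus : PySem.Dict Int (Int × Bool)) (kv : Int × Int) =>
      match consensus.get? kv.1 with
      | some p => if p.1 != kv.2 then consensus.insert kv.1 (p.1, false) else consensus
      | none => consensus.insert kv.1 (kv.2, true)) = pvMergeStep from rfl]
  induction te generalizing c with
  | nil => simp [pvMaps]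
  | cons ex te ih =>
    simp only [List.foldl_cons]
    by_cases hb : pvBad ex
    · rw [show (if ((PySem.Dict.mk ex).getD "input" []).length != ((PySem.Dict.mk ex).getD "output" []).length || (((PySem.Dict.mk ex).getD "input" []).headD []).length != (((PySem.Dict.mk ex).getD "output" []).headD []).length then c else ((pvColorMap ((PySem.Dict.mk ex).getD "input" []) ((PySem.Dict.mk ex).getD "output" [])).items.foldl pvMergeStep c)) = c from by simp_all [pvBad]]
      rw [ih]
      simp [pvMaps, hb]
    · rw [show (if ((PySem.Dict.mk ex).getD "input" []).length != ((PySem.Dict.mk ex).getD "output" []).length || (((PySem.Dict.mk ex).getD "input" []).headD []).length != (((PySem.Dict.mk ex).getD "output" []).headD []).length then c else ((pvColorMap ((PySem.Dict.mk ex).getD "input" []) ((PySem.Dict.mk ex).getD "output" [])).items.foldl pvMergeStep c)) = pvMerge c (pvCM ex) from by simp_all [pvBad, pvCM, pvMerge]]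
      rw [ih]
      simp [pvMaps, hb, pvCM]

theorem pv_nodup_keys_foldl {β : Type} (l : List β) (f : PySem.Dict Int Int → β → PySem.Dict Int Int)
    (hf : ∀ d x, d.keys.Nodup → (f d x).keys.Nodup) (d : PySem.Dict Int Int) (hd : d.keys.Nodup) :
    (l.foldl f d).keys.Nodup := by
  induction l generalizing d with
  | nil => exact hd
  | cons x l ih => exact ih _ (hf d x hd)

theorem pv_cmap_nodup (ex : List (String × List (List Int))) : (pvCM ex).keys.Nodup := by
  unfold pvCM pvColorMap
  apply pv_nodup_keys_foldl _ _ _ _ (by simp)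
  intro d i hd
  apply pv_nodup_keys_foldl _ _ _ _ hd
  intro d' j hd'
  split
  · exact PySem.Dict.nodup_keys_insert _ _ _ hd'
  · exact hd'

theorem pv_update_eq (s : PySem.Set Int) (xs : List Int) (h : xs.Nodup) :
    PySem.Set.update s xs = s ++ xs.filter (fun x => !PySem.Set.contains s x) := by
  induction xs generalizing s with
  | nil => simp [PySem.Set.update]
  | cons x xs ih =>
    have hstep : PySem.Set.update s (x :: xs) = PySem.Set.update (PySem.Set.add s x) xs := rfl
    rw [hstep]
    obtain ⟨hx, hnd⟩ := List.nodup_cons.mp h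
    by_cases hc : PySem.Set.contains s x
    · have hc' : x ∈ s := by simpa [PySem.Set.contains] using hc
      have hadd : PySem.Set.add s x = s := by simp [PySem.Set.add, PySem.Set.contains, hc']
      rw [hadd, ih s hnd]
      simp [PySem.Set.contains, hc']
    · have hc' : x ∉ s := by simpa [PySem.Set.contains] using hc
      have hadd : PySem.Set.add s x = s ++ [x] := by simp [PySem.Set.add, PySem.Set.contains, hc']
      rw [hadd, ih _ hnd]
      have hfx : xs.filter (fun y => !PySem.Set.contains (s ++ [x]) y) = xs.filter (fun y => !PySem.Set.contains s y) := by
        apply List.filter_congr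
        intro y hy
        have hyx : y ≠ x := by rintro rfl; exact hx hy
        simp [PySem.Set.contains, hyx]
      rw [hfx]
      simp [PySem.Set.contains, hc']

def pvKeys (maps : List (PySem.Dict Int Int)) : PySem.Set Int :=
  maps.foldl (fun all_keys m => PySem.Set.update all_keys m.keys) PySem.Set.empty

def pvVals (maps : List (PySem.Dict Int Int)) (k : Int) : List Int :=
  (maps.filter (fun m => m.contains k)).map (fun m => m.getD k 0)

def pvG (maps : List (PySem.Dict Int Int)) (k : Int) : Int × (Int × Bool) :=
  (k, ((pvVals maps k).headD 0, (pvVals maps k).all (fun v => v == (pvVals maps k).headD 0)))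

theorem pv_keys_append (maps : List (PySem.Dict Int Int)) (m : PySem.Dict Int Int) :
    pvKeys (maps ++ [m]) = PySem.Set.update (pvKeys maps) m.keys := by
  simp [pvKeys, List.foldl_append]

theorem pv_mem_update (s : PySem.Set Int) (xs : List Int) (y : Int) :
    y ∈ PySem.Set.update s xs ↔ y ∈ s ∨ y ∈ xs := by
  induction xs generalizing s with
  | nil => simp [PySem.Set.update]
  | cons x xs ih =>
    have hstep : PySem.Set.update s (x :: xs) = PySem.Set.update (PySem.Set.add s x) xs := rfl
    rw [hstep, ih]
    by_cases hc : x ∈ s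
    · have : PySem.Set.add s x = s := by simp [PySem.Set.add, PySem.Set.contains, hc]
      rw [this]
      constructor
      · rintro (hy | hy)
        · exact Or.inl hy
        · exact Or.inr (List.mem_cons_of_mem _ hy)
      · rintro (hy | hy)
        · exact Or.inl hy
        · rcases List.mem_cons.mp hy with rfl | hy
          · exact Or.inl hc
          · exact Or.inr hy
    · have : PySem.Set.add s x = s ++ [x] := by simp [PySem.Set.add, PySem.Set.contains, hc]
      rw [this]
      simp [List.mem_append, or_assoc, List.mem_cons]
  
theorem pv_mem_keys (maps : List (PySem.Dict Int Int)) (k : Int) :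
    k ∈ pvKeys maps ↔ ∃ m ∈ maps, m.contains k = true := by
  induction maps using List.reverseRecOn with
  | nil => simp [pvKeys, PySem.Set.empty]
  | append_singleton maps m ih =>
    rw [pv_keys_append, pv_mem_update, ih]
    constructor
    · rintro (⟨m', hm', hc⟩ | hk)
      · exact ⟨m', by simp [hm'], hc⟩
      · refine ⟨m, by simp, ?_⟩
        rw [PySem.Dict.contains_eq_decide_mem_keys]
        simpa using hk
    · rintro ⟨m', hm', hc⟩
      rcases List.mem_append.mp hm' with hm' | hm'
      · exact Or.inl ⟨m', hm', hc⟩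
      · right
        rcases List.mem_singleton.mp hm' with rfl
        rw [PySem.Dict.contains_eq_decide_mem_keys] at hc
        simpa using hc

theorem pv_keys_nodup (maps : List (PySem.Dict Int Int)) (h : ∀ m ∈ maps, m.keys.Nodup) :
    (pvKeys maps : List Int).Nodup := by
  induction maps using List.reverseRecOn with
  | nil => simp [pvKeys, PySem.Set.empty]
  | append_singleton maps m ih =>
    rw [pv_keys_append, pv_update_eq _ _ (h m (by simp))]
    apply List.Nodup.append
    · exact ih (fun m' hm' => h m' (by simp [hm']))
    · exact (h m (by simp)).filter _
    · intro a ha hb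
      have := List.of_mem_filter hb
      simp [PySem.Set.contains] at this
      exact this ha

theorem pv_vals_append (maps : List (PySem.Dict Int Int)) (m : PySem.Dict Int Int) (k : Int) :
    pvVals (maps ++ [m]) k = pvVals maps k ++ (if m.contains k then [m.getD k 0] else []) := by
  simp only [pvVals, List.filter_append, List.map_append]
  congr 1
  by_cases hc : m.contains k <;> simp [hc]

theorem pv_vals_ne_nil (maps : List (PySem.Dict Int Int)) (k : Int) (h : k ∈ pvKeys maps) :
    pvVals maps k ≠ [] := by
  rcases (pv_mem_keys maps k).mp h with ⟨m, hm, hc⟩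
  simp only [pvVals, ne_eq, List.map_eq_nil_iff, List.filter_eq_nil_iff]
  intro hall
  exact absurd hc (by simpa using hall m hm)

theorem pv_vals_nil (maps : List (PySem.Dict Int Int)) (k : Int) (h : ¬ k ∈ pvKeys maps) :
    pvVals maps k = [] := by
  simp only [pvVals, List.map_eq_nil_iff, List.filter_eq_nil_iff]
  intro m hm
  simp only [Bool.not_eq_true]
  by_contra hc
  exact h ((pv_mem_keys maps k).mpr ⟨m, hm, by simpa using hc⟩)

theorem pv_get?_eq_lookup (d : PySem.Dict Int Int) (k : Int) :
    d.get? k = List.lookup k d.items := by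
  obtain ⟨items⟩ := d
  induction items with
  | nil => rfl
  | cons p rest ih =>
    obtain ⟨a, b⟩ := p
    by_cases h : a = k
    · subst h
      simp [PySem.Dict.get?_mk_cons, List.lookup]
    · rw [PySem.Dict.get?_mk_cons]
      simp [List.lookup, h, show (k == a) = false by simpa using Ne.symm h, ih]

theorem pv_lookup_none (l : List (Int × Int)) (k : Int) (hkl : k ∉ l.map Prod.fst) :
    List.lookup k l = none := by
  induction l with
  | nil => rfl
  | cons p l ih =>
    obtain ⟨a, b⟩ := p
    simp only [List.map_cons, List.mem_cons] at hkl
    push Not at hkl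
    simp [List.lookup, show (k == a) = false by simpa using hkl.1, ih hkl.2]

theorem pv_merge_items (l : List (Int × Int)) (c : PySem.Dict Int (Int × Bool))
    (hc : c.keys.Nodup) (hl : (l.map Prod.fst).Nodup) :
    (l.foldl pvMergeStep c).items =
      c.items.map (fun p => (p.1, (p.2.1, p.2.2 &&
          (match List.lookup p.1 l with | some w => w == p.2.1 | none => true)))) ++
        (l.filter (fun kv => !c.contains kv.1)).map (fun kv => (kv.1, (kv.2, true))) := by
  induction l generalizing c with
  | nil => simp
  | cons kv l ih =>
    obtain ⟨k, w⟩ := kv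
    simp only [List.map_cons, List.nodup_cons] at hl
    obtain ⟨hkl, hl'⟩ := hl
    have hlook : List.lookup k l = none := pv_lookup_none l k hkl
    simp only [List.foldl_cons]
    rcases hget : c.get? k with _ | ⟨v, ok⟩
    · -- fresh key: insert (k, (w, true)) appended
      have hcont : c.contains k = false := by
        rw [PySem.Dict.contains_eq_isSome_get?, hget]; rfl
      have hstep : pvMergeStep c (k, w) = c.insert k (w, true) := by
        simp [pvMergeStep, hget]
      rw [hstep]
      have hkeys : k ∉ c.keys := by
        rw [PySem.Dict.contains_eq_decide_mem_keys] at hcont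
        simpa using hcont
      rw [ih _ (PySem.Dict.nodup_keys_insert _ _ _ hc) hl']
      rw [PySem.Dict.items_insert_of_not_contains _ _ hcont]
      rw [List.map_append, List.append_assoc]
      congr 1
      · apply List.map_congr_left
        rintro ⟨p1, p2⟩ hp
        have hpk : (p1 == k) = false := by
          simp only [beq_eq_false_iff_ne, ne_eq]
          rintro rfl
          exact hkeys (PySem.Dict.mem_keys_of_mem_items _ hp)
        simp [List.lookup, hpk]
      · simp only [List.map_cons, List.map_nil]
        have hfilt : l.filter (fun kv => !(c.insert k (w, true)).contains kv.1) =
            l.filter (fun kv => !c.contains kv.1) := by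
          apply List.filter_congr
          rintro ⟨q1, q2⟩ hq
          have hqk : (q1 == k) = false := by
            simp only [beq_eq_false_iff_ne, ne_eq]
            rintro rfl
            exact hkl (List.mem_map.mpr ⟨(q1, q2), hq, rfl⟩)
          rw [PySem.Dict.contains_insert]
          simp [hqk]
        rw [hfilt, List.filter_cons, show (!c.contains k) = true by simp [hcont]]
        simp [hlook]
    · -- existing key
      have hcont : c.contains k = true := by
        rw [PySem.Dict.contains_eq_isSome_get?, hget]; rfl
      by_cases hvw : v = w
      · subst hvw
        have hstep : pvMergeStep c (k, v) = c := by simp [pvMergeStep, hget]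
        rw [hstep, ih _ hc hl']
        congr 1
        · apply List.map_congr_left
          rintro ⟨p1, p2⟩ hp
          by_cases hpk : p1 = k
          · subst hpk
            have h1 : c.get? p1 = some p2 := PySem.Dict.get?_of_mem_items _ hp hc
            rw [hget] at h1
            obtain rfl : (v, ok) = p2 := by simpa using h1
            simp [List.lookup, hlook]
          · have hpk' : (p1 == k) = false := by simpa using hpk
            simp [List.lookup, hpk']
        · rw [List.filter_cons, show (!c.contains k) = false by simp [hcont]]
          simp
      · have hstep : pvMergeStep c (k, w) = c.insert k (v, false) := by
          simp [pvMergeStep, hget, hvw]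
        rw [hstep]
        have hkeys' : (c.insert k (v, false)).keys = c.keys := PySem.Dict.keys_insert_of_contains _ _ hcont
        rw [ih _ (hkeys' ▸ hc) hl']
        rw [PySem.Dict.items_insert_of_contains _ _ hcont]
        congr 1
        · rw [List.map_map]
          apply List.map_congr_left
          rintro ⟨p1, p2⟩ hp
          by_cases hpk : p1 = k
          · subst hpk
            have h1 : c.get? p1 = some p2 := PySem.Dict.get?_of_mem_items _ hp hc
            rw [hget] at h1
            obtain rfl : (v, ok) = p2 := by simpa using h1
            have hwv : (w == v) = false := by
              simp only [beq_eq_false_iff_ne, ne_eq]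
              exact fun h => hvw h.symm
            simp [Function.comp, List.lookup, hlook, hwv]
          · have hpk' : (p1 == k) = false := by simpa using hpk
            simp [Function.comp, List.lookup, hpk']
        · have hfilt : l.filter (fun kv => !(c.insert k (v, false)).contains kv.1) =
              l.filter (fun kv => !c.contains kv.1) := by
            apply List.filter_congr
            rintro ⟨q1, q2⟩ hq
            have hqk : (q1 == k) = false := by
              simp only [beq_eq_false_iff_ne, ne_eq]
              rintro rfl
              exact hkl (List.mem_map.mpr ⟨(q1, q2), hq, rfl⟩)
            rw [PySem.Dict.contains_insert]
            simp [hqk]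
          rw [hfilt, List.filter_cons, show (!c.contains k) = false by simp [hcont]]
          simp

theorem pv_headD_append (l t : List Int) (h : l ≠ []) : (l ++ t).headD 0 = l.headD 0 := by
  cases l <;> simp_all

theorem pv_B_canon (maps : List (PySem.Dict Int Int)) (h : ∀ m ∈ maps, m.keys.Nodup) :
    (maps.foldl pvMerge PySem.Dict.empty).items = (pvKeys maps).map (pvG maps) := by
  induction maps using List.reverseRecOn with
  | nil => rfl
  | append_singleton maps m ih =>
    have hm : m.keys.Nodup := h m (by simp)
    have hprev : ∀ m' ∈ maps, m'.keys.Nodup := fun m' hm' => h m' (by simp [hm'])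
    have hIH := ih hprev
    rw [List.foldl_append, List.foldl_cons, List.foldl_nil]
    have hkeysF : (maps.foldl pvMerge PySem.Dict.empty).keys = pvKeys maps := by
      show (maps.foldl pvMerge PySem.Dict.empty).items.map Prod.fst = _
      rw [hIH, List.map_map]
      rw [show (Prod.fst ∘ pvG maps) = id from funext (fun k => rfl), List.map_id]
    have hnodupF : (maps.foldl pvMerge PySem.Dict.empty).keys.Nodup := by
      rw [hkeysF]; exact pv_keys_nodup maps hprev
    show (m.items.foldl pvMergeStep _).items = _
    rw [pv_merge_items m.items _ hnodupF (show (m.items.map Prod.fst).Nodup from hm)]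
    rw [hIH, pv_keys_append, pv_update_eq _ _ hm, List.map_append]
    congr 1
    · rw [List.map_map]
      apply List.map_congr_left
      intro k hk
      have hvne : pvVals maps k ≠ [] := pv_vals_ne_nil maps k hk
      have hva := pv_vals_append maps m k
      simp only [Function.comp, pvG]
      rcases hg : m.get? k with _ | w
      · have hcont : m.contains k = false := by
          rw [PySem.Dict.contains_eq_isSome_get?, hg]; rfl
        rw [← pv_get?_eq_lookup, hg]
        simp only [hva, hcont]
        simp
      · have hcont : m.contains k = true := by
          rw [PySem.Dict.contains_eq_isSome_get?, hg]; rfl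
        have hgd : m.getD k 0 = w := by rw [PySem.Dict.getD_eq_get?_getD, hg]; rfl
        rw [← pv_get?_eq_lookup, hg]
        simp only [hva, hcont, if_true, hgd]
        rw [pv_headD_append _ _ hvne]
        simp [List.all_append]
    · rw [PySem.Dict.items_eq_map_keys m hm 0, List.filter_map, List.map_map]
      have hpred : (m.keys.filter ((fun kv => !(maps.foldl pvMerge PySem.Dict.empty).contains kv.1) ∘ (fun k => (k, m.getD k 0)))) = (m.keys.filter (fun x => !PySem.Set.contains (pvKeys maps) x)) := by
        apply List.filter_congr
        intro k _
        simp only [Function.comp]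
        rw [PySem.Dict.contains_eq_decide_mem_keys, hkeysF]
        simp [PySem.Set.contains]
      rw [hpred]
      apply List.map_congr_left
      intro k hk
      have hkm : k ∈ m.keys := List.mem_of_mem_filter hk
      have hnotin : k ∉ pvKeys maps := by
        have := List.of_mem_filter hk
        simpa [PySem.Set.contains] using this
      have hcont : m.contains k = true := by
        rw [PySem.Dict.contains_eq_decide_mem_keys]
        simpa using hkm
      simp only [Function.comp, pvG, pv_vals_append, pv_vals_nil maps k hnotin, hcont, if_true,
        List.nil_append]
      simp

theorem pv_cond_insert_fold (ks : List Int) (cond : Int → Bool) (f : Int → Int)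
    (d : PySem.Dict Int Int) (hk : ks.Nodup) (hd : ∀ k ∈ ks, d.contains k = false) :
    (ks.foldl (fun fm k => if cond k then fm.insert k (f k) else fm) d).items =
      d.items ++ ks.filterMap (fun k => if cond k then some (k, f k) else none) := by
  induction ks generalizing d with
  | nil => simp
  | cons k ks ih =>
    obtain ⟨hkk, hnd⟩ := List.nodup_cons.mp hk
    simp only [List.foldl_cons, List.filterMap_cons]
    by_cases hc : cond k
    · rw [if_pos hc, if_pos hc]
      have hfresh : ∀ k' ∈ ks, (d.insert k (f k)).contains k' = false := by
        intro k' hk'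
        rw [PySem.Dict.contains_insert, show (k' == k) = false by
          simp only [beq_eq_false_iff_ne, ne_eq]; rintro rfl; exact hkk hk']
        simpa using hd k' (by simp [hk'])
      rw [ih _ hnd hfresh, PySem.Dict.items_insert_of_not_contains _ _ (hd k (by simp))]
      simp
    · rw [if_neg hc, if_neg hc]
      exact ih _ hnd (fun k' hk' => hd k' (by simp [hk']))


-- named forms of the two result computations, as functions of the list of per-example maps
def pvA (maps : List (PySem.Dict Int Int)) : List (Int × Int) :=
  if maps.isEmpty then []
  else
    ((pvKeys maps).foldl (fun final_map key =>
      if !(pvVals maps key).isEmpty && (pvVals maps key).all (fun v => v == (pvVals maps key).headD 0) then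
        final_map.insert key ((pvVals maps key).headD 0)
      else final_map) PySem.Dict.empty).items

def pvB (maps : List (PySem.Dict Int Int)) : List (Int × Int) :=
  (maps.foldl pvMerge PySem.Dict.empty).items.filterMap (fun kv => if kv.2.2 then some (kv.1, kv.2.1) else none)

theorem pv_A_eq (te : List (List (String × List (List Int)))) : learn_color_map te = pvA (pvMaps te) := by
  rw [show learn_color_map te = pvA (te.foldl (fun all_maps ex =>
      let in_grid := (PySem.Dict.mk ex).getD "input" []
      let out_grid := (PySem.Dict.mk ex).getD "output" []
      if in_grid.length != out_grid.length || (in_grid.headD []).length != (out_grid.headD []).length then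
        all_maps
      else
        all_maps ++ [pvColorMap in_grid out_grid]) []) from rfl]
  rw [pv_portA_maps te [], List.nil_append]

theorem pv_B_eq (te : List (List (String × List (List Int)))) : learn_color_map_alt te = pvB (pvMaps te) := by
  rw [show learn_color_map_alt te = ((te.foldl (fun consensus ex =>
      let in_grid := (PySem.Dict.mk ex).getD "input" []
      let out_grid := (PySem.Dict.mk ex).getD "output" []
      if in_grid.length != out_grid.length || (in_grid.headD []).length != (out_grid.headD []).length then
        consensus
      else
        (pvColorMap in_grid out_grid).items.foldl (fun consensus kv =>
          match consensus.get? kv.1 with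
          | some p => if p.1 != kv.2 then consensus.insert kv.1 (p.1, false) else consensus
          | none => consensus.insert kv.1 (kv.2, true)) consensus) PySem.Dict.empty).items.filterMap (fun kv => if kv.2.2 then some (kv.1, kv.2.1) else none)) from rfl]
  rw [pv_portB_maps te PySem.Dict.empty]
  rfl

theorem pv_main (maps : List (PySem.Dict Int Int)) (h : ∀ m ∈ maps, m.keys.Nodup) :
    pvA maps = pvB maps := by
  unfold pvA pvB
  rcases hmaps : maps with _ | ⟨m0, rest⟩
  · rfl
  · rw [← hmaps]
    have hne : maps.isEmpty = false := by rw [hmaps]; rfl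
    rw [hne, if_neg (by simp)]
    rw [pv_B_canon maps h, List.filterMap_map]
    rw [pv_cond_insert_fold (pvKeys maps)
      (fun key => !(pvVals maps key).isEmpty && (pvVals maps key).all (fun v => v == (pvVals maps key).headD 0))
      (fun key => (pvVals maps key).headD 0) PySem.Dict.empty
      (pv_keys_nodup maps h) (fun k _ => PySem.Dict.contains_empty k)]
    rw [show (PySem.Dict.empty : PySem.Dict Int Int).items = [] from rfl, List.nil_append]
    apply List.filterMap_congr
    intro k hk
    have hvne : pvVals maps k ≠ [] := pv_vals_ne_nil maps k hk
    simp only [Function.comp, pvG]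
    rw [show (pvVals maps k).isEmpty = false from by simpa using hvne]
    simp

-- ===== VERDICT (by name: the statement is the Claim_ definition above) =====
theorem learn_color_map_spec : Claim_equal_learn_color_map := by
  intro te _ _
  unfold Spec_learn_color_map
  rw [pv_A_eq, pv_B_eq]
  apply pv_main
  intro m hm
  rcases List.mem_map.mp hm with ⟨ex, _, rfl⟩
  exact pv_cmap_nodup ex
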